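-- pv_equiv track=rewrite | github.com/Himon-SYNCRAFT/PythonAlgo | dfs_2.py | traverse_preorder
-- ===== SOURCE A (Python) =====
-- def traverse_preorder(graph, root):
--     visited, queue = set(), [root]
--
--     while queue:
--         node = queue.pop()
--
--         if node not in visited:
--             visited.add(node)
--             children = graph.get(node, [])
--             queue.extend(reversed(children))
--             yield node
-- ===== SOURCE B (Python) =====
-- def traverse_preorder(graph, root):
--     visited = set()
--
--     def rec(node):
--         if node in visited:
--             return
--         visited.add(node)
--         yield node
--         for child in graph.get(node, []):
--             yield from rec(child)
--
--     return rec(root)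
-- ===== Notes on version B (the rewrite author's own statement) =====
-- stated objective: simpler
-- what changed: A's explicit stack loop (pop from the end, mark-on-pop, children pushed reversed, duplicates allowed on the stack) is replaced by a recursive generator: an inner rec(node) marks the node on entry, yields it and 'yield from's rec(child) for each child, so there is no stack, no reversal and no duplicate entries.
import Mathlib
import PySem

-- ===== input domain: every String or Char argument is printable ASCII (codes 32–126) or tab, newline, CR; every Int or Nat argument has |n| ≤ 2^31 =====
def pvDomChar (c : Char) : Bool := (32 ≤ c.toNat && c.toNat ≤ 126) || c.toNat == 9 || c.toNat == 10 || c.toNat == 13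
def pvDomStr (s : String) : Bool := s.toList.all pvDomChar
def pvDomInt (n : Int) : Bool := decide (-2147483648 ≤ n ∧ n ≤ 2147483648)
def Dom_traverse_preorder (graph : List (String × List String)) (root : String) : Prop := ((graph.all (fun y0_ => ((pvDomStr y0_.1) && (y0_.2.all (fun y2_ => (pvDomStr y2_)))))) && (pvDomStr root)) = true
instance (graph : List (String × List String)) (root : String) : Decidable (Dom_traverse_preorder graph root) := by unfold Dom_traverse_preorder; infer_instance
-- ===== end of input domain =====

-- B replaces A's iterative pop-from-end/push-reversed-children DFS generator by a recursive
-- generator that marks each node on entry and delegates to its children (objective: simpler).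


-- Python 'graph.get(node, [])' on the association-list dict: first match, default [] (shared by both ports)
def pyDictGet (g : List (String × List String)) (k : String) : List String :=
  match g.find? (fun p => p.1 == k) with
  | some p => p.2
  | none => []

-- termination measure for A's loop (cited in decreasing_by): total length of the adjacency
-- lists of not-yet-visited entries
def pvS (g : List (String × List String)) (v : List String) : Nat :=
  ((g.filter (fun p => p.1 ∉ v)).map (fun p => p.2.length)).sum

theorem pvS_cons (p : String × List String) (g : List (String × List String)) (u : List String) :
    pvS (p :: g) u = (if p.1 ∈ u then 0 else p.2.length) + pvS g u := by
  by_cases h : p.1 ∈ u <;> simp [pvS, h]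

theorem pvS_mono (g : List (String × List String)) (v w : List String)
    (h : ∀ x, x ∈ v → x ∈ w) : pvS g w ≤ pvS g v := by
  induction g with
  | nil => simp [pvS]
  | cons p g ih =>
    rw [pvS_cons, pvS_cons]
    by_cases hv : p.1 ∈ v
    · simp [hv, h _ hv]; omega
    · by_cases hw : p.1 ∈ w <;> simp [hv, hw] <;> omega

theorem mem_of_mem_add (v : List String) (n x : String)
    (h : x ∈ v) : x ∈ PySem.Set.add v n := by
  rw [PySem.Set.mem_add]; exact Or.inl h

theorem mem_add_iff_of_ne (v : List String) (n x : String) (hx : x ≠ n) :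
    x ∈ PySem.Set.add v n ↔ x ∈ v := by
  rw [PySem.Set.mem_add]
  constructor
  · rintro (h | h)
    · exact h
    · exact absurd h hx
  · exact Or.inl

theorem pvS_add (g : List (String × List String)) (v : List String) (n : String)
    (h : n ∉ v) : pvS g (PySem.Set.add v n) + (pyDictGet g n).length ≤ pvS g v := by
  induction g with
  | nil => simp [pvS, pyDictGet]
  | cons p g ih =>
    rw [pvS_cons, pvS_cons]
    by_cases hp : p.1 = n
    · have hget : pyDictGet (p :: g) n = p.2 := by simp [pyDictGet, hp]
      have h1 : p.1 ∈ PySem.Set.add v n := by rw [PySem.Set.mem_add]; exact Or.inr hp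
      have h2 : p.1 ∉ v := hp ▸ h
      have h3 : pvS g (PySem.Set.add v n) ≤ pvS g v :=
        pvS_mono g v _ (fun x hx => mem_of_mem_add v n x hx)
      rw [hget]
      simp [h1, h2]
      omega
    · have hget : pyDictGet (p :: g) n = pyDictGet g n := by simp [pyDictGet, hp]
      rw [hget]
      by_cases hv : p.1 ∈ v
      · simp [hv, (mem_add_iff_of_ne v n p.1 hp).mpr hv]
        omega
      · have hv' : p.1 ∉ PySem.Set.add v n := fun hx => hv ((mem_add_iff_of_ne v n p.1 hp).mp hx)
        simp [hv, hv']
        omega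

-- ===== PORT A =====
-- the while loop: 'queue.pop()' takes the LAST element, 'queue.extend(reversed(children))'
-- appends the reversed adjacency list; the generator's yields are collected into the result list
def loopA (g : List (String × List String)) (visited : PySem.Set String) (queue : List String) :
    List String :=
  if hq : queue = [] then []
  else
    let node := queue.getLast hq
    if node ∈ visited then
      loopA g visited queue.dropLast
    else
      node :: loopA g (PySem.Set.add visited node) (queue.dropLast ++ (pyDictGet g node).reverse)
termination_by queue.length + pvS g visited
decreasing_by
  · have h1 : queue.length ≠ 0 := fun h => hq (List.eq_nil_of_length_eq_zero h)
    have h2 : queue.dropLast.length = queue.length - 1 := List.length_dropLast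
    omega
  · have h1 : queue.length ≠ 0 := fun h => hq (List.eq_nil_of_length_eq_zero h)
    have h2 : queue.dropLast.length = queue.length - 1 := List.length_dropLast
    have h3 := pvS_add g visited (queue.getLast hq) (by assumption)
    simp only [List.length_append, List.length_reverse]
    omega

def traverse_preorder (graph : List (String × List String)) (root : String) : List String :=
  loopA graph PySem.Set.empty [root]

-- ===== PORT B =====
-- Source B: rec(node) returns at once if node is visited, otherwise marks it, yields it, and
-- 'yield from's rec(child) for each child in order.  The recursion is made total with a fuel
-- argument (a guard only: fuel graph.length + 1 never runs out, proven in the lemmas below);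
-- the shared 'visited' set is threaded through the child loop (the foldl) and returned.
def visitB (g : List (String × List String)) :
    Nat → PySem.Set String → String → PySem.Set String × List String
  | 0, v, _ => (v, [])
  | fuel + 1, v, n =>
    if n ∈ v then (v, [])
    else
      (pyDictGet g n).foldl
        (fun acc c =>
          let r := visitB g fuel acc.1 c
          (r.1, acc.2 ++ r.2))
        (PySem.Set.add v n, [n])

def traverse_preorder_alt (graph : List (String × List String)) (root : String) : List String :=
  (visitB graph (graph.length + 1) PySem.Set.empty root).2

-- ===== PRECONDITION & SPEC =====
def Spec_traverse_preorder (graph : List (String × List String)) (root : String) (out : List String) : Prop := out = traverse_preorder_alt graph root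
instance (graph : List (String × List String)) (root : String) (out : List String) : Decidable (Spec_traverse_preorder graph root out) := by unfold Spec_traverse_preorder; infer_instance

-- ===== CLAIM (what is proved, stated in full; the proofs are below) =====
def Claim_equal_traverse_preorder : Prop := ∀ (graph : List (String × List String)) (root : String), Dom_traverse_preorder graph root → Spec_traverse_preorder graph root (traverse_preorder graph root)

-- ===== LEMMAS AND PROOFS =====

-- number of not-yet-visited graph entries (the bound B's fuel is measured against)
def pvK (g : List (String × List String)) (v : List String) : Nat :=
  (g.filter (fun p => p.1 ∉ v)).length

theorem pvK_cons (p : String × List String) (g : List (String × List String)) (u : List String) :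
    pvK (p :: g) u = (if p.1 ∈ u then 0 else 1) + pvK g u := by
  by_cases h : p.1 ∈ u <;> simp [pvK, h] <;> try omega

theorem pvK_mono (g : List (String × List String)) (v w : List String)
    (h : ∀ x, x ∈ v → x ∈ w) : pvK g w ≤ pvK g v := by
  induction g with
  | nil => simp [pvK]
  | cons p g ih =>
    rw [pvK_cons, pvK_cons]
    by_cases hv : p.1 ∈ v
    · simp [hv, h _ hv]; omega
    · by_cases hw : p.1 ∈ w <;> simp [hv, hw] <;> omega

theorem pvK_add_le (g : List (String × List String)) (v : List String) (n : String) :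
    pvK g (PySem.Set.add v n) ≤ pvK g v :=
  pvK_mono g v _ (fun x hx => mem_of_mem_add v n x hx)

theorem pvK_add_key (g : List (String × List String)) (v : List String) (n : String)
    (h : n ∉ v) (hk : (g.find? (fun p => p.1 == n)).isSome) :
    pvK g (PySem.Set.add v n) < pvK g v := by
  induction g with
  | nil => simp at hk
  | cons p g ih =>
    rw [pvK_cons, pvK_cons]
    by_cases hp : p.1 = n
    · have h1 : p.1 ∈ PySem.Set.add v n := by rw [PySem.Set.mem_add]; exact Or.inr hp
      have h2 : p.1 ∉ v := hp ▸ h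
      have h3 : pvK g (PySem.Set.add v n) ≤ pvK g v := pvK_add_le g v n
      simp [h1, h2]
      omega
    · have hk' : (g.find? (fun p => p.1 == n)).isSome := by
        simpa [List.find?_cons, hp] using hk
      by_cases hv : p.1 ∈ v
      · simp [hv, (mem_add_iff_of_ne v n p.1 hp).mpr hv]
        exact ih hk'
      · have hv' : p.1 ∉ PySem.Set.add v n := fun hx => hv ((mem_add_iff_of_ne v n p.1 hp).mp hx)
        simp [hv, hv']
        exact ih hk'

-- common reference form of the traversal: a flat to-do list processed front to back,
-- unvisited nodes prepend their children; returns the final visited set and the output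
def recLV (g : List (String × List String)) (v : PySem.Set String) (ns : List String) :
    PySem.Set String × List String :=
  match ns with
  | [] => (v, [])
  | n :: ns' =>
    if n ∈ v then recLV g v ns'
    else
      let r := recLV g (PySem.Set.add v n) (pyDictGet g n ++ ns')
      (r.1, n :: r.2)
termination_by ns.length + pvS g v
decreasing_by
  · simp only [List.length_cons]
    omega
  · have h3 := pvS_add g v n (by assumption)
    simp only [List.length_cons, List.length_append]
    omega

theorem recLV_mono (g : List (String × List String)) (v : PySem.Set String) (ns : List String) :
    ∀ x, x ∈ v → x ∈ (recLV g v ns).1 := by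
  fun_induction recLV g v ns with
  | case1 v => intro x hx; exact hx
  | case2 v n ns' hmem ih => exact ih
  | case3 v n ns' hmem r ih =>
    intro x hx
    exact ih x (mem_of_mem_add v n x hx)

theorem recLV_append (g : List (String × List String)) (v : PySem.Set String)
    (xs ys : List String) :
    recLV g v (xs ++ ys) =
      ((recLV g (recLV g v xs).1 ys).1,
        (recLV g v xs).2 ++ (recLV g (recLV g v xs).1 ys).2) := by
  fun_induction recLV g v xs with
  | case1 v => simp
  | case2 v n ns' hmem ih =>
    rw [List.cons_append, recLV, if_pos hmem, ih]
  | case3 v n ns' hmem r ih =>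
    rw [List.cons_append, recLV, if_neg hmem]
    simp only [← List.append_assoc] at ih ⊢
    rw [ih]
    simp
    exact ⟨rfl, rfl⟩

theorem visitB_correct (g : List (String × List String)) :
    ∀ fuel (v : PySem.Set String) (n : String), pvK g v < fuel →
      visitB g fuel v n = recLV g v [n] := by
  intro fuel
  induction fuel with
  | zero => intro v n h; omega
  | succ fuel IH =>
    have S : ∀ (ns : List String) (v' : PySem.Set String) (o0 : List String),
        pvK g v' < fuel →
        ns.foldl
          (fun acc c =>
            let r := visitB g fuel acc.1 c
            (r.1, acc.2 ++ r.2)) (v', o0)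
          = ((recLV g v' ns).1, o0 ++ (recLV g v' ns).2) := by
      intro ns
      induction ns with
      | nil => intro v' o0 _; simp [recLV]
      | cons c cs ihs =>
        intro v' o0 h
        rw [List.foldl_cons]
        have h1 : visitB g fuel v' c = recLV g v' [c] := IH v' c h
        have hdec := recLV_append g v' [c] cs
        simp only [List.singleton_append] at hdec
        rw [hdec]
        by_cases hc : c ∈ v'
        · have h2 : recLV g v' [c] = (v', []) := by
            rw [recLV, if_pos hc, recLV]
          simp only [h1, h2, List.append_nil]
          rw [ihs v' o0 h]
          simp
        · have hsub : ∀ x, x ∈ v' → x ∈ (recLV g v' [c]).1 := recLV_mono g v' [c]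
          have h3 : pvK g (recLV g v' [c]).1 < fuel :=
            lt_of_le_of_lt (pvK_mono g v' _ hsub) h
          rw [h1, ihs _ _ h3]
          simp
    intro v n h
    rw [visitB]
    by_cases hn : n ∈ v
    · rw [if_pos hn, recLV, if_pos hn, recLV]
    · rw [if_neg hn, recLV, if_neg hn]
      cases hch : pyDictGet g n with
      | nil => simp [recLV]
      | cons c cs =>
        have hkey : (g.find? (fun p => p.1 == n)).isSome := by
          rcases hfind : g.find? (fun p => p.1 == n) with _ | p
          · exfalso
            have : pyDictGet g n = [] := by simp [pyDictGet, hfind]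
            rw [this] at hch; simp at hch
          · rw [hfind]; rfl
        have h2 : pvK g (PySem.Set.add v n) < fuel :=
          lt_of_lt_of_le (pvK_add_key g v n hn hkey) (by omega)
        have hS := S (pyDictGet g n) (PySem.Set.add v n) [n] h2
        rw [hch] at hS
        simpa using hS

-- the output component of recLV (the form A's loop is reduced to)
theorem loopA_eq_recLV (g : List (String × List String)) (v : PySem.Set String)
    (q : List String) : loopA g v q = (recLV g v q.reverse).2 := by
  fun_induction loopA g v q with
  | case1 visited => simp [recLV]
  | case2 visited queue hq node hmem ih =>
    have hsplit : queue.reverse = queue.getLast hq :: queue.dropLast.reverse := by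
      conv_lhs => rw [← List.dropLast_append_getLast hq]
      simp
    rw [ih, hsplit, recLV, if_pos hmem]
  | case3 visited queue hq node hmem ih =>
    have hsplit : queue.reverse = queue.getLast hq :: queue.dropLast.reverse := by
      conv_lhs => rw [← List.dropLast_append_getLast hq]
      simp
    rw [ih, hsplit, recLV, if_neg hmem]
    simp [List.reverse_append]
    exact ⟨rfl, rfl⟩

theorem pvK_empty_le (g : List (String × List String)) :
    pvK g PySem.Set.empty ≤ g.length :=
  List.length_filter_le _ _

-- ===== VERDICT (by name: the statement is the Claim_ definition above) =====
theorem traverse_preorder_spec : Claim_equal_traverse_preorder := by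
  intro graph root _
  unfold Spec_traverse_preorder traverse_preorder traverse_preorder_alt
  rw [loopA_eq_recLV, visitB_correct graph (graph.length + 1) PySem.Set.empty root
        (lt_of_le_of_lt (pvK_empty_le graph) (by omega))]
  simp
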